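-- pv_equiv track=rewrite | github.com/leekwunfung817/ComputerVision-technique-ObjectRegister | src/func_unique_BgExtract.py | FileLis2ComLis
-- ===== SOURCE A (Python) =====
-- def appendCompond(lis,e1,e2):
-- 	if (e1,e2) not in lis and (e2,e1) not in lis and e2!=e1:
-- 		lis.append( (e1,e2) )
-- 	return lis
--
-- def FileLis2ComLis(fl, fp=None):
-- 	lis = []
-- 	for fn1 in fl:
-- 		for fn2 in fl:
-- 			fp1 = fp+fn1
-- 			fp2 = fp+fn2
-- 			lis = appendCompond(lis,fp1,fp2)
-- 	return lis
-- ===== SOURCE B (Python) =====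
-- def FileLis2ComLis(fl, fp=None):
--     vals = []
--     for fn in fl:
--         v = fp + fn
--         if v not in vals:
--             vals.append(v)
--     out = []
--     for i, v in enumerate(vals):
--         for w in vals[i + 1:]:
--             out.append((v, w))
--     return out
-- ===== Notes on version B (the rewrite author's own statement) =====
-- stated objective: faster
-- what changed: Instead of scanning the growing pair list for both orientations of every candidate pair inside the O(n^2) nested loop, B first de-duplicates the values in one pass and then emits all i<j combinations directly with no membership tests on pairs.
import Mathlib
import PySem

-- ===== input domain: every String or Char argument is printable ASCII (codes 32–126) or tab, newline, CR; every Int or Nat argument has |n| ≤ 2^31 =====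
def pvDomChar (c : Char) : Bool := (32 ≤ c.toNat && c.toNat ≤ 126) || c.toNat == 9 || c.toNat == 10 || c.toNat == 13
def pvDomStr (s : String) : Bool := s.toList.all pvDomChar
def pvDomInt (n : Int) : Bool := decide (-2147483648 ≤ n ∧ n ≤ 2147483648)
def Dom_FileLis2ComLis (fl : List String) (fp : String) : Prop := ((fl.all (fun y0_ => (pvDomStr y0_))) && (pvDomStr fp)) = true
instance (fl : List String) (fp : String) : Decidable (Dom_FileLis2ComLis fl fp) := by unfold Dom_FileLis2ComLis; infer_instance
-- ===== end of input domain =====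

-- B replaces A's quadratic pair-scan inside the nested loops by a one-pass
-- de-duplication of the values followed by a direct emission of all i<j pairs
-- (objective: faster; no pair-membership tests remain).

-- ===== PORT A =====
def pvAppendCompond (lis : List (String × String)) (e1 e2 : String) : List (String × String) :=
  if (e1, e2) ∉ lis ∧ (e2, e1) ∉ lis ∧ e2 ≠ e1 then lis ++ [(e1, e2)] else lis

def FileLis2ComLis (fl : List String) (fp : String) : List (String × String) :=
  fl.foldl (fun lis fn1 =>
    fl.foldl (fun lis fn2 => pvAppendCompond lis (fp ++ fn1) (fp ++ fn2)) lis) []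

-- ===== PORT B =====
-- the nested emission loop of Source B: for i, v: for w in vals[i+1:]
def pvComb : List String → List (String × String)
  | [] => []
  | v :: rest => rest.map (fun w => (v, w)) ++ pvComb rest

def FileLis2ComLis_alt (fl : List String) (fp : String) : List (String × String) :=
  pvComb (fl.foldl (fun vs fn => if (fp ++ fn) ∈ vs then vs else vs ++ [fp ++ fn]) [])

-- ===== PRECONDITION & SPEC =====
def Spec_FileLis2ComLis (fl : List String) (fp : String) (out : List (String × String)) : Prop := out = FileLis2ComLis_alt fl fp
instance (fl : List String) (fp : String) (out : List (String × String)) : Decidable (Spec_FileLis2ComLis fl fp out) := by unfold Spec_FileLis2ComLis; infer_instance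

-- ===== CLAIM (what is proved, stated in full; the proofs are below) =====
def Claim_equal_FileLis2ComLis : Prop := ∀ (fl : List String) (fp : String), Dom_FileLis2ComLis fl fp → Spec_FileLis2ComLis fl fp (FileLis2ComLis fl fp)

-- ===== LEMMAS AND PROOFS =====

-- `newly acc l`: the first occurrences of elements of l not in acc, in order.
def newly (acc : List String) : List String → List String
  | [] => []
  | x :: l => if x ∈ acc then newly acc l else x :: newly (acc ++ [x]) l

lemma dedupFold_eq (l : List String) : ∀ acc : List String,
    l.foldl (fun vs v => if v ∈ vs then vs else vs ++ [v]) acc = acc ++ newly acc l := by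
  induction l with
  | nil => intro acc; simp [newly]
  | cons x l ih =>
    intro acc
    by_cases hx : x ∈ acc
    · simp [List.foldl_cons, hx, newly, ih]
    · simp [List.foldl_cons, hx, newly, ih]

lemma mem_newly {w : String} : ∀ (l acc : List String), w ∈ newly acc l ↔ w ∈ l ∧ w ∉ acc := by
  intro l
  induction l with
  | nil => intro acc; simp [newly]
  | cons x l ih =>
    intro acc
    by_cases hx : x ∈ acc
    · rw [newly, if_pos hx, ih]
      constructor
      · rintro ⟨h1, h2⟩; exact ⟨List.mem_cons_of_mem _ h1, h2⟩
      · rintro ⟨h1, h2⟩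
        rcases List.mem_cons.mp h1 with rfl | h1
        · exact absurd hx h2
        · exact ⟨h1, h2⟩
    · rw [newly, if_neg hx, List.mem_cons, ih]
      constructor
      · rintro (rfl | ⟨h1, h2⟩)
        · exact ⟨List.mem_cons_self .., hx⟩
        · exact ⟨List.mem_cons_of_mem _ h1, fun hc => h2 (List.mem_append_left _ hc)⟩
      · rintro ⟨h1, h2⟩
        by_cases hwx : w = x
        · exact Or.inl hwx
        · rcases List.mem_cons.mp h1 with h1 | h1
          · exact absurd h1 hwx
          · refine Or.inr ⟨h1, fun hc => ?_⟩
            rcases List.mem_append.mp hc with hc | hc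
            · exact h2 hc
            · exact hwx (List.mem_singleton.mp hc)

lemma newly_congr : ∀ (l acc acc' : List String), (∀ w, w ∈ acc ↔ w ∈ acc') →
    newly acc l = newly acc' l := by
  intro l
  induction l with
  | nil => intro acc acc' _; simp [newly]
  | cons x l ih =>
    intro acc acc' h
    by_cases hx : x ∈ acc
    · rw [newly, newly, if_pos hx, if_pos ((h x).mp hx)]; exact ih _ _ h
    · rw [newly, newly, if_neg hx, if_neg (fun hc => hx ((h x).mpr hc))]
      congr 1
      exact ih _ _ (fun w => by simp [List.mem_append, h w])

lemma newly_snoc (x : String) : ∀ (l acc : List String),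
    newly (acc ++ [x]) l = (newly acc l).filter (fun w => w ≠ x) := by
  intro l
  induction l with
  | nil => intro acc; simp [newly]
  | cons y l ih =>
    intro acc
    by_cases hy : y ∈ acc
    · rw [newly, if_pos (by simp [hy]), newly, if_pos hy, ih]
    · by_cases hyx : y = x
      · rw [hyx] at hy ⊢
        rw [newly, if_pos (by simp), newly, if_neg hy]
        rw [List.filter_cons_of_neg (by simp)]
        refine (List.filter_eq_self.mpr ?_).symm
        intro w hw
        have hmm := (mem_newly l (acc ++ [x])).mp hw
        simp only [ne_eq, decide_eq_true_eq]
        exact fun hc => hmm.2 (by simp [hc])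
      · rw [newly, if_neg (by simp [hy, hyx]), newly, if_neg hy]
        rw [List.filter_cons_of_pos (by simpa using hyx)]
        congr 1
        rw [← ih]
        exact newly_congr _ _ _ (fun w => by simp [List.mem_append]; tauto)

lemma nodup_newly : ∀ (l acc : List String), acc.Nodup → (acc ++ newly acc l).Nodup := by
  intro l
  induction l with
  | nil => intro acc h; simpa [newly]
  | cons x l ih =>
    intro acc h
    by_cases hx : x ∈ acc
    · rw [newly, if_pos hx]; exact ih acc h
    · rw [newly, if_neg hx, show acc ++ x :: newly (acc ++ [x]) l = (acc ++ [x]) ++ newly (acc ++ [x]) l by simp]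
      refine ih (acc ++ [x]) ?_
      rw [List.nodup_append]
      refine ⟨h, List.nodup_singleton x, ?_⟩
      intro a ha b hb heq
      rw [List.mem_singleton] at hb
      exact hx ((heq.trans hb) ▸ ha)

-- `pref P S`: for each u in P (in order), the pairs (u, w) for every later w.
def pref : List String → List String → List (String × String)
  | [], _ => []
  | u :: P', S => (P' ++ S).map (fun w => (u, w)) ++ pref P' S

lemma pref_nil_right : ∀ P : List String, pref P [] = pvComb P := by
  intro P
  induction P with
  | nil => rfl
  | cons u P' ih => simp [pref, pvComb, ih]

lemma pref_mem_fst {a b : String} : ∀ (P S : List String), (a, b) ∈ pref P S → a ∈ P := by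
  intro P
  induction P with
  | nil => intro S h; simp [pref] at h
  | cons u P' ih =>
    intro S h
    simp only [pref, List.mem_append, List.mem_map] at h
    rcases h with ⟨w, _, hw⟩ | h
    · injection hw with h1 _
      exact List.mem_cons.mpr (Or.inl h1.symm)
    · exact List.mem_cons_of_mem _ (ih S h)

lemma pref_mem_of {a b : String} : ∀ (P S : List String), a ∈ P → b ∈ S → (a, b) ∈ pref P S := by
  intro P
  induction P with
  | nil => intro S h; simp at h
  | cons u P' ih =>
    intro S ha hb
    rcases List.mem_cons.mp ha with h | h
    · subst h
      exact List.mem_append_left _ (List.mem_map.mpr ⟨b, List.mem_append_right _ hb, rfl⟩)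
    · exact List.mem_append_right _ (ih S h hb)

lemma pref_mem_pair {a b : String} : ∀ (P S : List String), a ∈ P → b ∈ P → a ≠ b →
    (a, b) ∈ pref P S ∨ (b, a) ∈ pref P S := by
  intro P
  induction P with
  | nil => intro S h; simp at h
  | cons u P' ih =>
    intro S ha hb hab
    rcases List.mem_cons.mp ha with h | h
    · subst h
      have hb' : b ∈ P' := (List.mem_cons.mp hb).resolve_left (fun hc => hab hc.symm)
      exact Or.inl (List.mem_append_left _ (List.mem_map.mpr ⟨b, List.mem_append_left _ hb', rfl⟩))
    · rcases List.mem_cons.mp hb with h' | h'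
      · subst h'
        exact Or.inr (List.mem_append_left _ (List.mem_map.mpr ⟨a, List.mem_append_left _ h, rfl⟩))
      · rcases ih S h h' hab with hh | hh
        · exact Or.inl (List.mem_append_right _ hh)
        · exact Or.inr (List.mem_append_right _ hh)

lemma pref_snoc (m : String) : ∀ (P S : List String),
    pref (P ++ [m]) S = pref P (m :: S) ++ S.map (fun w => (m, w)) := by
  intro P
  induction P with
  | nil => intro S; simp [pref]
  | cons u P' ih =>
    intro S
    simp only [List.cons_append, pref, ih]
    simp

-- A's inner loop is a no-op when the current value m is already in P.
lemma inner_noop (P S : List String) (m : String) (hm : m ∈ P) :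
    ∀ ws : List String, (∀ w ∈ ws, w ∈ P ++ S) →
    ws.foldl (fun lis w => pvAppendCompond lis m w) (pref P S) = pref P S := by
  intro ws
  induction ws with
  | nil => intro _; rfl
  | cons w ws ih =>
    intro hws
    have hw : w ∈ P ++ S := hws w (List.mem_cons_self)
    have hstep : pvAppendCompond (pref P S) m w = pref P S := by
      unfold pvAppendCompond
      by_cases hwm : w = m
      · simp [hwm]
      · rcases List.mem_append.mp hw with hP | hS
        · rcases pref_mem_pair P S hm hP (fun hc => hwm hc.symm) with hh | hh
          · simp [hh]
          · simp [hh]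
        · simp [pref_mem_of P S hm hS]
    rw [List.foldl_cons, hstep]
    exact ih (fun w' hw' => hws w' (List.mem_cons_of_mem _ hw'))

-- A's inner loop for a fresh value m appends exactly (m, w) for each later distinct value w.
lemma inner_fresh (P S' : List String) (m : String)
    (ND : (P ++ m :: S').Nodup) :
    ∀ (ws T : List String), T ++ newly (P ++ m :: T) ws = S' →
    (∀ w ∈ ws, w ∈ P ++ m :: S') →
    ws.foldl (fun lis w => pvAppendCompond lis m w)
        (pref P (m :: S') ++ T.map (fun w => (m, w)))
      = pref P (m :: S') ++ S'.map (fun w => (m, w)) := by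
  have hmP : m ∉ P := by
    intro hc
    exact (List.nodup_append.mp ND).2.2 m hc m (List.mem_cons_self ..) rfl
  intro ws
  induction ws with
  | nil =>
    intro T hT _
    rw [newly] at hT
    simp only [List.append_nil] at hT
    rw [hT]
    rfl
  | cons w ws ih =>
    intro T hT hws
    have hTS : ∀ t ∈ T, t ∈ S' := by
      intro t ht
      rw [← hT]; exact List.mem_append_left _ ht
    have hw : w ∈ P ++ m :: S' := hws w (List.mem_cons_self)
    by_cases hseen : w ∈ P ++ m :: T
    · -- already handled: no pair is appended
      have hstep : pvAppendCompond (pref P (m :: S') ++ T.map (fun w => (m, w))) m w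
          = pref P (m :: S') ++ T.map (fun w => (m, w)) := by
        unfold pvAppendCompond
        rcases List.mem_append.mp hseen with hP | hmT
        · have : (w, m) ∈ pref P (m :: S') := pref_mem_of P _ hP (List.mem_cons_self)
          simp [this]
        · rcases List.mem_cons.mp hmT with he | hTmem
          · simp [he]
          · have : (m, w) ∈ T.map (fun w => (m, w)) := List.mem_map.mpr ⟨w, hTmem, rfl⟩
            simp [this]
      rw [List.foldl_cons, hstep]
      refine ih T ?_ (fun w' hw' => hws w' (List.mem_cons_of_mem _ hw'))
      rwa [newly, if_pos hseen] at hT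
    · -- fresh: the pair (m, w) is appended
      have hwS' : w ∈ S' := by
        rcases List.mem_append.mp hw with hP | hmS
        · exact absurd (List.mem_append_left _ hP : w ∈ P ++ m :: T) hseen
        · rcases List.mem_cons.mp hmS with he | hS
          · exact absurd (by simp [he] : w ∈ P ++ m :: T) hseen
          · exact hS
      have hwm : w ≠ m := fun hc => hseen (by simp [hc])
      have hwP : w ∉ P := fun hc => hseen (List.mem_append_left _ hc)
      have hwT : w ∉ T := fun hc => hseen (by simp [hc])
      have hstep : pvAppendCompond (pref P (m :: S') ++ T.map (fun w => (m, w))) m w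
          = pref P (m :: S') ++ (T ++ [w]).map (fun w => (m, w)) := by
        unfold pvAppendCompond
        have h1 : (m, w) ∉ pref P (m :: S') := fun hc => hmP (pref_mem_fst P _ hc)
        have h2 : (m, w) ∉ T.map (fun w => (m, w)) := by
          intro hc
          rcases List.mem_map.mp hc with ⟨t, ht, he⟩
          injection he with _ h2'
          exact hwT (h2' ▸ ht)
        have h3 : (w, m) ∉ pref P (m :: S') := fun hc => hwP (pref_mem_fst P _ hc)
        have h4 : (w, m) ∉ T.map (fun w => (m, w)) := by
          intro hc
          rcases List.mem_map.mp hc with ⟨t, _, he⟩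
          injection he with h4' _
          exact hwm h4'.symm
        have hcond : ((m, w) ∉ pref P (m :: S') ++ T.map (fun w => (m, w))) ∧
            ((w, m) ∉ pref P (m :: S') ++ T.map (fun w => (m, w))) ∧ w ≠ m := by
          refine ⟨?_, ?_, hwm⟩ <;> simp [List.mem_append, h1, h2, h3, h4]
        rw [if_pos hcond]
        try simp
      rw [List.foldl_cons, hstep]
      refine ih (T ++ [w]) ?_ (fun w' hw' => hws w' (List.mem_cons_of_mem _ hw'))
      rw [newly, if_neg hseen] at hT
      rw [← hT]
      simp only [List.append_assoc, List.cons_append, List.nil_append]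

-- A's outer loop, with P the distinct values already processed.
lemma outer_inv (ms vals : List String) (hv : vals = newly [] ms) :
    ∀ (xs P : List String), P ++ newly P xs = vals → newly P ms = newly P xs →
    xs.foldl (fun lis m => ms.foldl (fun lis w => pvAppendCompond lis m w) lis)
        (pref P (newly P xs)) = pref vals [] := by
  have NDv : vals.Nodup := by
    rw [hv]
    simpa using nodup_newly ms [] (List.nodup_nil)
  have hcov : ∀ w ∈ ms, w ∈ vals := by
    intro w hw
    rw [hv]
    exact (mem_newly ms []).mpr ⟨hw, by simp⟩
  intro xs
  induction xs with
  | nil =>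
    intro P hP _
    rw [newly] at hP ⊢
    simp only [List.append_nil] at hP
    rw [hP]
    rfl
  | cons x xs ih =>
    intro P hP hms
    by_cases hx : x ∈ P
    · rw [newly, if_pos hx] at hP hms ⊢
      rw [List.foldl_cons,
        inner_noop P (newly P xs) x hx ms (fun w hw => hP ▸ hcov w hw)]
      exact ih P hP hms
    · rw [newly, if_neg hx] at hP hms ⊢
      set S' := newly (P ++ [x]) xs with hS'
      have hvals : vals = P ++ x :: S' := hP.symm
      have ND : (P ++ x :: S').Nodup := hvals ▸ NDv
      have hxS' : x ∉ S' := by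
        intro hc
        exact ((mem_newly xs (P ++ [x])).mp hc).2 (by simp)
      have hmsx : newly (P ++ [x]) ms = S' := by
        rw [newly_snoc x ms P, hms, List.filter_cons_of_neg (by simp),
          List.filter_eq_self.mpr]
        intro w hw
        simp only [ne_eq, decide_eq_true_eq]
        exact fun hc => hxS' (hc ▸ hw)
      rw [List.foldl_cons]
      have hinner := inner_fresh P S' x ND ms [] (by simpa using hmsx)
        (fun w hw => hvals ▸ hcov w hw)
      simp only [List.map_nil, List.append_nil] at hinner
      rw [hinner, ← pref_snoc x P S']
      have hP' : (P ++ [x]) ++ newly (P ++ [x]) xs = vals := by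
        rw [hvals, ← hS']; simp
      have hms' : newly (P ++ [x]) ms = newly (P ++ [x]) xs := by
        rw [hmsx, hS']
      rw [show pref (P ++ [x]) S' = pref (P ++ [x]) (newly (P ++ [x]) xs) from by rw [← hS']]
      exact ih (P ++ [x]) hP' hms'

-- ===== VERDICT (by name: the statement is the Claim_ definition above) =====
theorem FileLis2ComLis_spec : Claim_equal_FileLis2ComLis := by
  intro fl fp _
  unfold Spec_FileLis2ComLis FileLis2ComLis FileLis2ComLis_alt
  have hmapA : fl.foldl (fun lis fn1 =>
      fl.foldl (fun lis fn2 => pvAppendCompond lis (fp ++ fn1) (fp ++ fn2)) lis) []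
      = (fl.map (fun fn => fp ++ fn)).foldl (fun lis m =>
        (fl.map (fun fn => fp ++ fn)).foldl (fun lis w => pvAppendCompond lis m w) lis) [] := by
    rw [List.foldl_map]
    congr 1
    funext lis fn1
    rw [List.foldl_map]
  have hmapB : fl.foldl (fun vs fn => if (fp ++ fn) ∈ vs then vs else vs ++ [fp ++ fn]) []
      = newly [] (fl.map (fun fn => fp ++ fn)) := by
    have h := dedupFold_eq (fl.map (fun fn => fp ++ fn)) []
    simp only [List.nil_append] at h
    rw [← h, List.foldl_map]
  rw [hmapA, hmapB, ← pref_nil_right]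
  exact outer_inv (fl.map (fun fn => fp ++ fn)) _ rfl _ [] (by simp) rfl
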